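-- pv_equiv track=rewrite | github.com/jnossa/Homework-1 | hw1_second_questions.py | count_jobs
-- ===== SOURCE A (Python) =====
-- def count_jobs(data):
--     job_counts = {}
--     for entry in data:
--         # Get the 'jobs' list for the user (default to an empty list)
--         user_jobs = entry.get('jobs', [])
--
--         # Iterate through the jobs for the current user
--         for job in user_jobs:
--             # Update the job counts dictionary
--             if job in job_counts:
--                 # Increment the count if the job already exists
--                 job_counts[job] += 1
--             else:
--                 # Initialize the count if the job is encountered for the first time
--                 job_counts[job] = 1
--
--     return job_counts
-- ===== SOURCE B (Python) =====
-- def count_jobs(data):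
--     # Flatten all jobs, then tally by partition recursion: take the first job,
--     # its multiplicity is how many elements filtering it out removes, and
--     # recurse on the remainder (which yields first-occurrence order).
--     flat = [job for entry in data for job in entry.get('jobs', [])]
--     return dict(_tally(flat))
--
-- def _tally(jobs):
--     if not jobs:
--         return []
--     head, rest = jobs[0], jobs[1:]
--     others = [j for j in rest if j != head]
--     return [(head, 1 + len(rest) - len(others))] + _tally(others)
-- ===== Notes on version B (the rewrite author's own statement) =====
-- stated objective: alternative
-- what changed: Replaces incremental hash-map accumulation with a partition recursion over the flattened job list: take the first job, obtain its count as the number of elements removed by filtering it out, and recurse on the filtered remainder; no dictionary is used while counting.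
import Mathlib
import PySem

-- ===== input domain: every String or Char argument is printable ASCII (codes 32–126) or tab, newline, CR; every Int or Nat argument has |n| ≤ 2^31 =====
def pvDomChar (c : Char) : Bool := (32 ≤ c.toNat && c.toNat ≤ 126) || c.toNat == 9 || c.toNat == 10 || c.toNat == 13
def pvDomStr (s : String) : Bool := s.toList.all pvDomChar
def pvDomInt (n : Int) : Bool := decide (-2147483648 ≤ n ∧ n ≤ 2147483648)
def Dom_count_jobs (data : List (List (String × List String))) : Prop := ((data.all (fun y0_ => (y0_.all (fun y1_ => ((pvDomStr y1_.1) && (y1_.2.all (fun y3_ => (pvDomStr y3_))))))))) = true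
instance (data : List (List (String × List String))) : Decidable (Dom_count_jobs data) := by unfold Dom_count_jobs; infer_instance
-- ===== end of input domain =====

-- B replaces A's incremental hash-map accumulation by a partition recursion over the flattened list (alternative, not faster).

-- ===== PORT A =====
-- literal transliteration: dict accumulation with contains test, then the dict's items
def count_jobs (data : List (List (String × List String))) : List (String × Int) :=
  (data.foldl (fun job_counts entry =>
      ((PySem.Dict.mk entry).getD "jobs" []).foldl (fun jc job =>
        if jc.contains job then jc.insert job (jc.getD job 0 + 1)
        else jc.insert job 1) job_counts)
    PySem.Dict.empty).items

-- ===== PORT B =====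
-- literal transliteration of Source B's _tally: head, filter it out of the tail, recurse
def tallyAux : List String → List (String × Int)
  | [] => []
  | head :: rest =>
    (head, 1 + (rest.length : Int) - ((rest.filter (fun j => j ≠ head)).length : Int))
      :: tallyAux (rest.filter (fun j => j ≠ head))
termination_by jobs => jobs.length
decreasing_by
  simp only [List.length_unattach, List.length_cons]
  exact Nat.lt_succ_of_le (le_trans (List.length_filter_le _ _) (le_of_eq List.length_attach))

-- literal transliteration of Source B's count_jobs: flatten comprehension, then _tally
def count_jobs_alt (data : List (List (String × List String))) : List (String × Int) :=
  tallyAux (data.flatMap (fun entry => (PySem.Dict.mk entry).getD "jobs" []))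

-- ===== PRECONDITION & SPEC =====
def Spec_count_jobs (data : List (List (String × List String))) (out : List (String × Int)) : Prop := out = count_jobs_alt data
instance (data : List (List (String × List String))) (out : List (String × Int)) : Decidable (Spec_count_jobs data out) := by unfold Spec_count_jobs; infer_instance

-- ===== CLAIM (what is proved, stated in full; the proofs are below) =====
def Claim_equal_count_jobs : Prop := ∀ (data : List (List (String × List String))), Dom_count_jobs data → Spec_count_jobs data (count_jobs data)

-- ===== LEMMAS AND PROOFS =====

-- A's branching update is the canonical counting update
theorem cj_step_eq (d : PySem.Dict String Int) (x : String) :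
    (if d.contains x then d.insert x (d.getD x 0 + 1) else d.insert x 1) =
      d.insert x (d.getD x 0 + 1) := by
  by_cases h : d.contains x = true
  · simp [h]
  · have h' : d.contains x = false := eq_false_of_ne_true h
    simp [h', PySem.Dict.getD_of_not_contains]

-- the nested loop over per-entry job lists is the counting loop over the flattened list
theorem cj_foldl_flatMap {α β γ : Type} (jobs : α → List β) (step : γ → β → γ)
    (data : List α) (init : γ) :
    data.foldl (fun d e => (jobs e).foldl step d) init =
      (data.flatMap jobs).foldl step init := by
  induction data generalizing init with
  | nil => rfl
  | cons e rest ih => simp [List.flatMap_cons, List.foldl_append, ih]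

-- adding an element already present is skipped, so filtering it out changes nothing
theorem cj_foldl_add_filter (xs : List String) (h : String) :
    ∀ acc : PySem.Set String, h ∈ acc →
      xs.foldl PySem.Set.add acc = (xs.filter (fun j => j ≠ h)).foldl PySem.Set.add acc := by
  induction xs with
  | nil => intro acc _; rfl
  | cons y t ih =>
    intro acc hmem
    by_cases hy : y = h
    · subst hy
      have hskip : PySem.Set.add acc y = acc := by
        simp [PySem.Set.add, PySem.Set.contains, hmem]
      simp [hskip, ih acc hmem]
    · have hmem' : h ∈ PySem.Set.add acc y := by
        simp only [PySem.Set.add]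
        split
        · exact hmem
        · exact List.mem_append_left _ hmem
      simp only [List.filter_cons, decide_eq_true_eq]
      rw [if_pos hy, List.foldl_cons, List.foldl_cons]
      exact ih _ hmem'

-- an accumulator head not occurring later stays in front
theorem cj_foldl_add_cons (ys : List String) (h : String) :
    ∀ acc : List String, h ∉ ys →
      ys.foldl PySem.Set.add (h :: acc) = h :: ys.foldl PySem.Set.add acc := by
  induction ys with
  | nil => intro acc _; rfl
  | cons y t ih =>
    intro acc hnm
    have hyh : y ≠ h := by rintro rfl; exact hnm List.mem_cons_self
    have hhy : (y == h) = false := beq_eq_false_iff_ne.mpr hyh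
    have hnt : h ∉ t := fun hm => hnm (List.mem_cons_of_mem _ hm)
    by_cases hc : acc.contains y = true
    · have hc2 : (h :: acc).contains y = true := by
        simp only [List.contains_cons, hhy, Bool.false_or]; exact hc
      simp only [List.foldl_cons, PySem.Set.add, PySem.Set.contains, hc, hc2, if_true]
      exact ih acc hnt
    · have hc' : acc.contains y = false := by
        cases hb : acc.contains y
        · rfl
        · exact absurd hb hc
      have hc2 : (h :: acc).contains y = false := by
        simp only [List.contains_cons, hhy, Bool.false_or]
        exact hc'
      simp only [List.foldl_cons, PySem.Set.add, PySem.Set.contains, hc', hc2,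
        Bool.false_eq_true, if_false, List.cons_append]
      exact ih _ hnt

-- first-occurrence dedup peels off the head and filters it out of the tail
theorem cj_ofList_cons (h : String) (xs : List String) :
    PySem.Set.ofList (h :: xs) = h :: PySem.Set.ofList (xs.filter (fun j => j ≠ h)) := by
  have h0 : PySem.Set.ofList (h :: xs) = xs.foldl PySem.Set.add [h] := by
    rw [PySem.Set.ofList_eq_foldl]
    simp [List.foldl_cons, PySem.Set.add, PySem.Set.contains]
  have hnm : h ∉ xs.filter (fun j => j ≠ h) := by
    intro hm
    have := List.of_mem_filter hm
    simp at this
  rw [h0, cj_foldl_add_filter xs h [h] (List.mem_singleton.mpr rfl)]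
  have : ([h] : List String) = h :: [] := rfl
  rw [this, cj_foldl_add_cons _ h [] hnm, PySem.Set.ofList_eq_foldl]

-- tallyAux computes the dedup-and-count view of the counter (induction on a length bound)
theorem cj_tally_eq_aux (n : Nat) : ∀ xs : List String, xs.length ≤ n →
    tallyAux xs = (PySem.Set.ofList xs).map (fun k => (k, (xs.count k : Int))) := by
  induction n with
  | zero =>
    intro xs h
    have hx : xs = [] := List.eq_nil_of_length_eq_zero (Nat.le_zero.mp h)
    subst hx
    simp [tallyAux]
  | succ n ih =>
    intro xs h
    cases xs with
    | nil => simp [tallyAux]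
    | cons head rest =>
      rw [tallyAux, cj_ofList_cons, List.map_cons]
      have hlen : (rest.filter (fun j => j ≠ head)).length + rest.count head = rest.length := by
        have hL : rest.length
            = rest.countP (fun j => j == head) + rest.countP (fun j => !(j == head)) := by
          simpa using List.length_eq_countP_add_countP (fun j => j == head) (l := rest)
        have h1 : (rest.filter (fun j => j ≠ head)).length
            = rest.countP (fun j => !(j == head)) := by
          rw [← List.countP_eq_length_filter]
          apply List.countP_congr
          intro a _
          simp
        have h2 : rest.count head = rest.countP (fun j => j == head) := rfl
        omega
      have hhead : (1 + (rest.length : Int) - ((rest.filter (fun j => j ≠ head)).length : Int))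
          = (((head :: rest).count head : Nat) : Int) := by
        rw [List.count_cons_self]
        omega
      have hrec := ih (rest.filter (fun j => j ≠ head))
        (le_trans (List.length_filter_le _ _) (Nat.le_of_succ_le_succ h))
      rw [hhead, hrec]
      congr 1
      apply List.map_congr_left
      intro k hk
      have hk' : k ∈ rest.filter (fun j => j ≠ head) := (PySem.Set.mem_ofList _ _).mp hk
      have hkh : k ≠ head := by
        have := List.of_mem_filter hk'
        simpa using this
      have h1 : (head :: rest).count k = rest.count k := by
        simp only [List.count_cons]
        have : ¬head = k := fun e => hkh e.symm
        simp [this]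
      have h2 : (rest.filter (fun j => j ≠ head)).count k = rest.count k :=
        List.count_filter (by simp [hkh])
      rw [h1, ← h2]

theorem cj_tally_eq (xs : List String) :
    tallyAux xs = (PySem.Set.ofList xs).map (fun k => (k, (xs.count k : Int))) :=
  cj_tally_eq_aux xs.length xs le_rfl

-- ===== VERDICT (by name: the statement is the Claim_ definition above) =====
theorem count_jobs_spec : Claim_equal_count_jobs := by
  intro data _
  show count_jobs data = count_jobs_alt data
  unfold count_jobs count_jobs_alt
  have hstep : (fun (jc : PySem.Dict String Int) job =>
      if jc.contains job then jc.insert job (jc.getD job 0 + 1) else jc.insert job 1) =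
      fun jc job => jc.insert job (jc.getD job 0 + 1) := by
    funext jc job; exact cj_step_eq jc job
  rw [hstep, cj_foldl_flatMap, PySem.Dict.foldl_insert_getD_add_one_eq_counter,
    PySem.Dict.items_counter, cj_tally_eq]
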